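-- pv_equiv track=rewrite | github.com/RengarAndKhz/PureStorageInterview | Calculator.py | helper
-- ===== SOURCE A (Python) =====
-- def helper(stack):
--     digit = []
--     operation = []
--     for item in stack:
--         if item in ('+', '-'):
--             operation.append(item)
--         else:
--             digit.append(item)
--     while operation and len(digit) > 1:
--
--         a = int(digit.pop())
--         b = int(digit.pop())
--
--         oper = operation.pop()
--         if oper == '+':
--             res = a + b
--         else:
--             res = a - b
--         digit.append(str(res))
--     return digit[-1]
-- ===== SOURCE B (Python) =====
-- def helper(stack):
--     digits = [x for x in stack if x not in ('+', '-')]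
--     ops = [x for x in stack if x in ('+', '-')]
--     acc = digits[-1]
--     for op, d in zip(ops[::-1], digits[:-1][::-1]):
--         acc = str(int(acc) + int(d)) if op == '+' else str(int(acc) - int(d))
--     return acc
-- ===== Notes on version B (the rewrite author's own statement) =====
-- stated objective: simpler
-- what changed: Replaces A's partition-then-pop/push working-stack machine by two comprehensions, a zip of the reversed ops with the reversed digits-but-last, and a single accumulator fold, with no mutable working stack.
import Mathlib
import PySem

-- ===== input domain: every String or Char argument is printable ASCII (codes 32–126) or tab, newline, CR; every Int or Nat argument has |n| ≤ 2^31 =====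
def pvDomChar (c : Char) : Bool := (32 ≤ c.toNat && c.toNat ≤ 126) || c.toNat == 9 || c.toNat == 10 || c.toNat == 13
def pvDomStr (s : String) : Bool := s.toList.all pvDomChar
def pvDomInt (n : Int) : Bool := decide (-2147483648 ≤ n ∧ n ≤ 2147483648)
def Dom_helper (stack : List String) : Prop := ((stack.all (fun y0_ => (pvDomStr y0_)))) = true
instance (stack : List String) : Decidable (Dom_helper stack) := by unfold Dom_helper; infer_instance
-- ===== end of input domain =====

-- B replaces A's pop/push working stack by two comprehensions, a zip and a single
-- string accumulator fold (objective: simpler); return values agree on Pre_helper.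

-- ===== PORT A =====
-- while operation and len(digit) > 1: pop two digits, pop an op, push str(res).
-- int(...) is PySem.Int.ofStr?; a ValueError (none) cannot occur under Pre_helper,
-- so the port takes .getD 0 there.
def helperLoop (digit : List String) (operation : List String) : List String :=
  if h : operation ≠ [] ∧ 1 < digit.length then
    let a : Int := (PySem.Int.ofStr? (digit.getLast?.getD "")).getD 0
    let digit1 := digit.dropLast
    let b : Int := (PySem.Int.ofStr? (digit1.getLast?.getD "")).getD 0
    let oper := operation.getLast?.getD ""
    let res : Int := if oper = "+" then a + b else a - b
    helperLoop (digit1.dropLast ++ [PySem.Int.toStr res]) operation.dropLast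
  else digit
termination_by operation.length
decreasing_by
  have hne : operation ≠ [] := h.1
  cases operation with
  | nil => exact absurd rfl hne
  | cons x xs => simp

def helper (stack : List String) : String :=
  -- for item in stack: append to operation if item in ('+','-') else to digit
  let p := stack.foldl
    (fun (p : List String × List String) item =>
      if item = "+" ∨ item = "-" then (p.1, p.2 ++ [item]) else (p.1 ++ [item], p.2))
    ([], [])
  -- return digit[-1]  (IndexError on empty digit list is excluded by Pre_helper)
  ((helperLoop p.1 p.2).getLast?).getD ""

-- ===== PORT B =====
-- acc = str(int(acc) + int(d)) if op == '+' else str(int(acc) - int(d))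
def helperStep (acc : String) (p : String × String) : String :=
  if p.1 = "+" then
    PySem.Int.toStr ((PySem.Int.ofStr? acc).getD 0 + (PySem.Int.ofStr? p.2).getD 0)
  else
    PySem.Int.toStr ((PySem.Int.ofStr? acc).getD 0 - (PySem.Int.ofStr? p.2).getD 0)

-- ops[::-1] is reverse (PySem.List.slice?_none_none_neg_one), digits[:-1] is dropLast
-- (PySem.List.slice_to_neg_one); digits[-1] on the empty list (IndexError) is excluded
-- by Pre_helper, the port takes .getD "" there.
def helper_alt (stack : List String) : String :=
  let digits := stack.filter (fun x => !(x == "+" || x == "-"))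
  let ops := stack.filter (fun x => x == "+" || x == "-")
  let acc := (digits.getLast?).getD ""
  (List.zip ops.reverse digits.dropLast.reverse).foldl helperStep acc

-- ===== PRECONDITION & SPEC =====
-- Pre_helper holds exactly where the Python A returns normally: at least one
-- non-operator item (else digit[-1] raises IndexError), and — when the reduction
-- loop runs at all — every digit string it consumes parses with int() (else
-- ValueError): the last digit and the min(len(ops), len(digits)-1) digits below it.
def Pre_helper (stack : List String) : Prop :=
  let digits := stack.filter (fun x => !(x == "+" || x == "-"))
  let ops := stack.filter (fun x => x == "+" || x == "-")
  digits ≠ [] ∧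
    (ops = [] ∨ digits.length < 2 ∨
      ((PySem.Int.ofStr? ((digits.getLast?).getD "")).isSome ∧
        ∀ s ∈ digits.dropLast.drop (digits.dropLast.length - ops.length),
          (PySem.Int.ofStr? s).isSome))
instance (stack : List String) : Decidable (Pre_helper stack) := by
  unfold Pre_helper; infer_instance

def pvWitness_helper : List String := ["1", "+", "2"]

def Spec_helper (stack : List String) (out : String) : Prop := out = helper_alt stack
instance (stack : List String) (out : String) : Decidable (Spec_helper stack out) := by
  unfold Spec_helper; infer_instance

-- ===== CLAIM (what is proved, stated in full; the proofs are below) =====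
def Claim_equal_helper : Prop :=
  ∀ (stack : List String), Dom_helper stack → Pre_helper stack → Spec_helper stack (helper stack)

-- ===== LEMMAS AND PROOFS =====

-- A's partition pass is the pair of filters B uses.
theorem partition_eq_filters (l : List String) (d o : List String) :
    l.foldl
      (fun (p : List String × List String) item =>
        if item = "+" ∨ item = "-" then (p.1, p.2 ++ [item]) else (p.1 ++ [item], p.2))
      (d, o)
    = (d ++ l.filter (fun x => !(x == "+" || x == "-")),
       o ++ l.filter (fun x => x == "+" || x == "-")) := by
  induction l generalizing d o with
  | nil => simp
  | cons x t ih =>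
    by_cases hx : x = "+" ∨ x = "-"
    · have hb : (x == "+" || x == "-") = true := by
        rcases hx with h | h <;> simp [h]
      simp only [List.foldl_cons, if_pos hx, ih, List.filter_cons, hb]
      simp
    · have hb : (x == "+" || x == "-") = false := by
        simp only [Bool.or_eq_false_iff, beq_eq_false_iff_ne]
        exact ⟨fun h => hx (Or.inl h), fun h => hx (Or.inr h)⟩
      simp only [List.foldl_cons, if_neg hx, ih, List.filter_cons, hb]
      simp

-- A's working-stack loop, started on digits ds with s on top, computes B's fold of
-- helperStep over the (op, digit) pairs consumed from the tops of both lists.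
theorem helperLoop_eq_fold (os ds : List String) (s : String) :
    helperLoop (ds ++ [s]) os
      = ds.take (ds.length - os.length)
        ++ [(List.zip os.reverse ds.reverse).foldl helperStep s] := by
  induction os using List.reverseRecOn generalizing ds s with
  | nil =>
    rw [helperLoop]
    simp
  | append_singleton os' op _ =>
    rcases ds.eq_nil_or_concat' with rfl | ⟨ds₀, dl, rfl⟩
    · rw [helperLoop]
      simp
    · rw [helperLoop]
      rename_i ih
      have hguard : (os' ++ [op] ≠ []) ∧ 1 < ((ds₀ ++ [dl]) ++ [s]).length := by
        refine ⟨by simp, by simp⟩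
      rw [dif_pos hguard]
      simp only [List.getLast?_concat, Option.getD_some, List.dropLast_concat]
      have hstep :
          PySem.Int.toStr
            (if op = "+" then
              (PySem.Int.ofStr? s).getD 0 + (PySem.Int.ofStr? dl).getD 0
            else (PySem.Int.ofStr? s).getD 0 - (PySem.Int.ofStr? dl).getD 0)
          = helperStep s (op, dl) := by
        simp [helperStep, apply_ite PySem.Int.toStr]
      rw [hstep, ih ds₀ (helperStep s (op, dl))]
      rw [List.reverse_concat, List.reverse_concat, List.zip_cons_cons, List.foldl_cons]
      have hlen : (ds₀ ++ [dl]).length - (os' ++ [op]).length = ds₀.length - os'.length := by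
        simp
      rw [hlen, List.take_append_of_le_length (Nat.sub_le _ _)]

-- ===== VERDICT (by name: the statement is the Claim_ definition above) =====
theorem helper_spec : Claim_equal_helper := by
  intro stack _ _
  unfold Spec_helper helper helper_alt
  rw [partition_eq_filters]
  simp only [List.nil_append]
  rcases (stack.filter (fun x => !(x == "+" || x == "-"))).eq_nil_or_concat'
    with hds | ⟨ds₀, dl, hds⟩
  · rw [hds]
    rw [helperLoop]
    simp
  · rw [hds]
    rw [helperLoop_eq_fold]
    simp
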